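-- pv_equiv track=rewrite | github.com/cristobalJR/UNI | 2025-2026/CUATRIMESTRE 2/Diseño y Analisis de Algoritmos/Ejercicios Juez/02 Algoritmos Voraces/DoraLaTentadora/DoraLaTentadora.py | greedy_schedule
-- ===== SOURCE A (Python) =====
-- def greedy_schedule(profit, deadline):
--     n = len(profit)
--     candidates = list(range(n))
--     candidates.sort(key=lambda i: profit[i], reverse=True)
--     last_date = max(deadline)
--     sol = [-1] * (last_date + 1)
--     filled = 0
--     for best in candidates:
--         if filled == last_date + 1:
--             break
--         i = deadline[best]
--         while i >= 0:
--             if sol[i] == -1: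
--                 sol[i] = best
--                 filled += 1
--                 break
--             i -= 1
--
--     return sol, last_date
-- ===== SOURCE B (Python) =====
-- # Same greedy (jobs by descending profit, latest free slot <= deadline), but the
-- # free slot is found with a disjoint-set-union "next free slot" structure instead
-- # of scanning the schedule array downwards.
--
-- def _find(parent, x):
--     root = x
--     while parent[root] != root:
--         root = parent[root]
--     while parent[x] != root:
--         parent[x], x = root, parent[x]
--     return root
--
-- def greedy_schedule(profit, deadline):
--     n = len(profit)
--     order = sorted(range(n), key=lambda i: profit[i], reverse=True)
--     last_date = max(deadline)
--     sol = [-1] * (last_date + 1)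
--     # node s+1 stands for slot s; node 0 is a sentinel meaning "no free slot"
--     parent = list(range(last_date + 2))
--     for job in order:
--         d = deadline[job]
--         r = _find(parent, d + 1) if d >= 0 else 0
--         if r > 0:
--             sol[r - 1] = job
--             parent[r] = _find(parent, r - 1)
--     return sol, last_date
-- ===== Notes on version B (the rewrite author's own statement) =====
-- stated objective: alternative
-- what changed: A finds a free slot by scanning the schedule array downward from each deadline; B finds the latest free slot with a disjoint-set-union 'next free slot' structure with path compression, so filled slots are never rescanned (same result, different algorithm; not measurably faster on the generated inputs).
-- outside the precondition, e.g. on greedy_schedule([5, 1], [0]): A returns ([0], 0), B raises IndexError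
import Mathlib
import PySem

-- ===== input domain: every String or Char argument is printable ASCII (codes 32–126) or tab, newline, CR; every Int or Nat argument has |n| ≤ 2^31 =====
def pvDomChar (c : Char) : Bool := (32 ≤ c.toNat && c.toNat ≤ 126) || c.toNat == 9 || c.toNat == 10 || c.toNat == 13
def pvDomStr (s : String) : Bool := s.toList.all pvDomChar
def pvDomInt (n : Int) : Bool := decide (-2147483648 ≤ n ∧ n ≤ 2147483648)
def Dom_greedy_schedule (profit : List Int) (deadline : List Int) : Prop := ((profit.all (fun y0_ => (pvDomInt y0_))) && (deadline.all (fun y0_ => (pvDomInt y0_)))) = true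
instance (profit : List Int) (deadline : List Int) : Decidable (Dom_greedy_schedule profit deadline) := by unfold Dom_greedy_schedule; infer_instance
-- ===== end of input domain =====

-- B replaces A's downward scan of the schedule array by a disjoint-set-union
-- "latest free slot ≤ deadline" structure; equivalence of return values is proved.

-- ===== PORT A =====
-- inner `while i >= 0` loop of A: scan slots i, i-1, … for a free one; returns (sol', placed)
def pvAInner (sol : List Int) (best : Int) (i : Int) : List Int × Bool :=
  if _h : 0 ≤ i then
    if PySem.List.pyGetD sol i 0 == -1 then (PySem.List.pySetD sol i best, true)
    else pvAInner sol best (i - 1)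
  else (sol, false)
termination_by (i + 1).toNat
decreasing_by omega

-- `for best in candidates` loop of A, with the `filled == last_date + 1` break
def pvALoop (deadline : List Int) (last_date : Int) : List Int → List Int → Int → List Int
  | [], sol, _ => sol
  | best :: rest, sol, filled =>
    if filled == last_date + 1 then sol
    else
      let sp := pvAInner sol best (PySem.List.pyGetD deadline best 0)
      pvALoop deadline last_date rest sp.1 (if sp.2 then filled + 1 else filled)

def greedy_schedule (profit : List Int) (deadline : List Int) : List Int × Int :=
  let n : Int := profit.length
  let candidates := PySem.List.sorted (PySem.List.pyRange 0 n 1) (fun i => PySem.List.pyGetD profit i 0) true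
  let last_date := (PySem.List.max? deadline (fun x => x)).getD 0
  let sol := PySem.List.pyRepeat [-1] (last_date + 1)
  (pvALoop deadline last_date candidates sol 0, last_date)

-- ===== PORT B =====
def pvBRoot (parent : List Int) : Nat → Int → Int
  | 0, root => root
  | f + 1, root =>
    let p := PySem.List.pyGetD parent root 0
    if p == root then root else pvBRoot parent f p

def pvBCompress (root : Int) : Nat → List Int → Int → List Int
  | 0, parent, _ => parent
  | f + 1, parent, x =>
    let p := PySem.List.pyGetD parent x 0
    if p == root then parent else pvBCompress root f (PySem.List.pySetD parent x root) p

def pvBFind (parent : List Int) (x : Int) : Int × List Int :=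
  (pvBRoot parent (x + 1).toNat x, pvBCompress (pvBRoot parent (x + 1).toNat x) (x + 1).toNat parent x)

-- `for job in order` loop of B
def pvBLoop (deadline : List Int) : List Int → List Int → List Int → List Int
  | [], sol, _ => sol
  | job :: rest, sol, parent =>
    let d := PySem.List.pyGetD deadline job 0
    let rp := if 0 ≤ d then pvBFind parent (d + 1) else (0, parent)
    if 0 < rp.1 then
      let rp2 := pvBFind rp.2 (rp.1 - 1)
      pvBLoop deadline rest (PySem.List.pySetD sol (rp.1 - 1) job) (PySem.List.pySetD rp2.2 rp.1 rp2.1)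
    else pvBLoop deadline rest sol rp.2

def greedy_schedule_alt (profit : List Int) (deadline : List Int) : List Int × Int :=
  let n : Int := profit.length
  let order := PySem.List.sorted (PySem.List.pyRange 0 n 1) (fun i => PySem.List.pyGetD profit i 0) true
  let last_date := (PySem.List.max? deadline (fun x => x)).getD 0
  let sol := PySem.List.pyRepeat [-1] (last_date + 1)
  let parent := PySem.List.pyRange 0 (last_date + 2) 1
  (pvBLoop deadline order sol parent, last_date)

-- ===== PRECONDITION & SPEC =====
-- Pre_ excludes empty `deadline` (max(deadline) raises ValueError) and profit longer than
-- deadline, where A's deadline[best] raises IndexError except accidentally when the early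
-- `filled` break is reached first (and B's natural loop raises there).
def Pre_greedy_schedule (profit : List Int) (deadline : List Int) : Prop :=
  deadline ≠ [] ∧ profit.length ≤ deadline.length
instance (profit : List Int) (deadline : List Int) : Decidable (Pre_greedy_schedule profit deadline) := by unfold Pre_greedy_schedule; infer_instance
def pvWitness_greedy_schedule : List Int × List Int := ([3, 1, 2], [2, 1, 2])

def Spec_greedy_schedule (profit : List Int) (deadline : List Int) (out : List Int × Int) : Prop := out = greedy_schedule_alt profit deadline
instance (profit : List Int) (deadline : List Int) (out : List Int × Int) : Decidable (Spec_greedy_schedule profit deadline out) := by unfold Spec_greedy_schedule; infer_instance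

-- ===== CLAIM (what is proved, stated in full; the proofs are below) =====
def Claim_equal_greedy_schedule : Prop := ∀ (profit : List Int) (deadline : List Int), Dom_greedy_schedule profit deadline → Pre_greedy_schedule profit deadline → Spec_greedy_schedule profit deadline (greedy_schedule profit deadline)

-- ===== LEMMAS AND PROOFS =====

-- the latest free slot: pvFr sol x = the largest r with 0 < r ≤ x and sol[r-1] = -1, else 0
def pvFr (sol : List Int) (x : Int) : Int :=
  if _h : x ≤ 0 then 0
  else if sol.getD (x - 1).toNat 0 = -1 then x else pvFr sol (x - 1)
termination_by x.toNat
decreasing_by omega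

lemma pvFr_zero (sol : List Int) (x : Int) (hx : x ≤ 0) : pvFr sol x = 0 := by
  rw [pvFr, dif_pos hx]

lemma pvFr_pos_free (sol : List Int) (x : Int) (hx : 0 < x)
    (hfree : sol.getD (x - 1).toNat 0 = -1) : pvFr sol x = x := by
  rw [pvFr, dif_neg (by omega), if_pos hfree]

lemma pvFr_pos_filled (sol : List Int) (x : Int) (hx : 0 < x)
    (hfill : sol.getD (x - 1).toNat 0 ≠ -1) : pvFr sol x = pvFr sol (x - 1) := by
  rw [pvFr, dif_neg (by omega), if_neg hfill]

lemma pvFr_nonneg (sol : List Int) (x : Int) : 0 ≤ pvFr sol x := by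
  fun_induction pvFr with
  | case1 => omega
  | case2 => omega
  | case3 _ _ _ ih => exact ih

lemma pvFr_le (sol : List Int) (x : Int) (hx : 0 ≤ x) : pvFr sol x ≤ x := by
  fun_induction pvFr with
  | case1 => omega
  | case2 => omega
  | case3 x h _ ih => have := ih (by omega); omega

lemma pvFr_between (sol : List Int) (x y : Int) (h1 : pvFr sol x ≤ y) (h2 : y ≤ x) :
    pvFr sol y = pvFr sol x := by
  fun_induction pvFr sol x with
  | case1 x h => rw [pvFr_zero sol y (by omega)]
  | case2 x h hfree =>
    have : y = x := by omega
    rw [this]; exact pvFr_pos_free sol x (by omega) hfree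
  | case3 x h hfree ih =>
    rcases eq_or_lt_of_le h2 with rfl | hlt
    · exact pvFr_pos_filled sol y (by omega) hfree
    · exact ih h1 (by omega)

lemma pvFr_free (sol : List Int) (x : Int) (h : 0 < pvFr sol x) :
    sol.getD (pvFr sol x - 1).toNat 0 = -1 := by
  fun_induction pvFr sol x with
  | case1 x hx => omega
  | case2 x hx hfree => exact hfree
  | case3 x hx hfree ih => exact ih h

lemma pvFr_all_filled (sol : List Int) (h : ∀ i : Nat, sol.getD i 0 ≠ -1) (x : Int) :
    pvFr sol x = 0 := by
  fun_induction pvFr sol x with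
  | case1 x hx => rfl
  | case2 x hx hfree => exact absurd hfree (h _)
  | case3 x hx hfree ih => exact ih

lemma pvFr_replicate (n : Nat) (x : Int) (h0 : 0 ≤ x) (h1 : x ≤ n) :
    pvFr (List.replicate n (-1)) x = x := by
  rcases eq_or_lt_of_le h0 with rfl | hpos
  · exact pvFr_zero _ _ le_rfl
  · refine pvFr_pos_free _ x hpos ?_
    rw [List.getD_eq_getElem _ _ (by simp; omega)]
    simp

lemma pvFr_lt_len (sol : List Int) (x : Int) (h : 0 < pvFr sol x) :
    pvFr sol x - 1 < (sol.length : Int) := by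
  by_contra hc
  have := pvFr_free sol x h
  rw [List.getD_eq_default] at this
  · exact absurd this (by norm_num)
  · omega

lemma pvFr_set_lt (sol : List Int) (r v : Int) (hr : 0 ≤ r - 1) :
    ∀ z : Int, z ≤ r - 1 → pvFr (sol.set (r - 1).toNat v) z = pvFr sol z := by
  intro z hz
  fun_induction pvFr sol z with
  | case1 z hzz => exact pvFr_zero _ _ hzz
  | case2 z hzz hfreez =>
    refine pvFr_pos_free _ z (by omega) ?_
    unfold List.getD
    rw [List.getElem?_set_ne (by omega)]
    exact hfreez
  | case3 z hzz hfreez ih =>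
    rw [pvFr_pos_filled _ z (by omega) ?_]
    · exact ih (by omega)
    · unfold List.getD
      rw [List.getElem?_set_ne (by omega)]
      exact hfreez

lemma pvFr_set (sol : List Int) (r v : Int) (h0 : 0 < r)
    (hfree : sol.getD (r - 1).toNat 0 = -1) (hv : v ≠ -1) (y : Int) :
    pvFr (sol.set (r - 1).toNat v) y = if pvFr sol y = r then pvFr sol (r - 1) else pvFr sol y := by
  have hlen : (r - 1).toNat < sol.length := by
    have h1 := pvFr_lt_len sol r (by rw [pvFr_pos_free sol r h0 hfree]; omega)
    rw [pvFr_pos_free sol r h0 hfree] at h1; omega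
  have hget_ne : ∀ y : Int, 0 < y → y ≠ r →
      (sol.set (r - 1).toNat v).getD (y - 1).toNat 0 = sol.getD (y - 1).toNat 0 := by
    intro y hy hyr
    unfold List.getD
    rw [List.getElem?_set_ne (by omega)]
  fun_induction pvFr sol y with
  | case1 y hy =>
    rw [pvFr_zero _ _ hy, if_neg (by omega)]
  | case2 y hy hyfree =>
    by_cases hyr : y = r
    · subst hyr
      have hgd : (sol.set (y - 1).toNat v).getD (y - 1).toNat 0 = v := by
        unfold List.getD
        rw [List.getElem?_set_self hlen]
        rfl
      rw [pvFr_pos_filled _ y (by omega) (by rw [hgd]; exact hv), if_pos rfl]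
      exact pvFr_set_lt sol y v (by omega) (y - 1) le_rfl
    · rw [pvFr_pos_free _ y (by omega) (by rw [hget_ne y (by omega) hyr]; exact hyfree),
          if_neg hyr]
  | case3 y hy hyfree ih =>
    rw [pvFr_pos_filled _ y (by omega) (by rw [hget_ne y (by omega) (by rintro rfl; exact hyfree hfree)]; exact hyfree)]
    exact ih

-- the DSU invariant: every parent link jumps down, but not past the latest free slot,
-- and a fixed point is a free slot (or the 0 sentinel)
def pvInv (parent sol : List Int) : Prop :=
  ∀ x : Nat, x < parent.length →
    pvFr sol x ≤ parent.getD x 0 ∧ parent.getD x 0 ≤ (x : Int) ∧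
      (parent.getD x 0 = (x : Int) → pvFr sol x = x)

lemma pvGetD_bridge (xs : List Int) (i : Int) (h0 : 0 ≤ i) (h1 : i < (xs.length : Int)) :
    PySem.List.pyGetD xs i 0 = xs.getD i.toNat 0 := by
  rw [PySem.List.pyGetD_eq_getElem xs 0 h0 h1, List.getD_eq_getElem _ _ (by omega)]

lemma pvBRoot_eq (parent sol : List Int) (hInv : pvInv parent sol) :
    ∀ (fuel : Nat) (x : Int), 0 ≤ x → x < (parent.length : Int) → x.toNat < fuel →
      pvBRoot parent fuel x = pvFr sol x := by
  intro fuel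
  induction fuel with
  | zero => intro x _ _ h; omega
  | succ f ih =>
    intro x hx0 hx hf
    obtain ⟨hle, hge, hfix⟩ := hInv x.toNat (by omega)
    have hxcast : ((x.toNat : Nat) : Int) = x := by omega
    rw [hxcast] at hle hge hfix
    have hget : PySem.List.pyGetD parent x 0 = parent.getD x.toNat 0 := pvGetD_bridge parent x hx0 hx
    show (if PySem.List.pyGetD parent x 0 == x then x else pvBRoot parent f (PySem.List.pyGetD parent x 0)) = pvFr sol x
    by_cases hpx : parent.getD x.toNat 0 = x
    · rw [hget, hpx]
      simp [hfix hpx]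
    · rw [hget, if_neg (by simpa using hpx)]
      have hfr0 : 0 ≤ pvFr sol x := pvFr_nonneg sol x
      have hlt : parent.getD x.toNat 0 < x := by omega
      rw [ih (parent.getD x.toNat 0) (by omega) (by omega) (by omega)]
      exact pvFr_between sol x _ hle (by omega)

lemma pvBCompress_inv (sol : List Int) (root : Int) :
    ∀ (fuel : Nat) (parent : List Int) (x : Int), pvInv parent sol → 0 ≤ x →
      x < (parent.length : Int) → pvFr sol x = root →
      (pvBCompress root fuel parent x).length = parent.length ∧
        pvInv (pvBCompress root fuel parent x) sol := by
  intro fuel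
  induction fuel with
  | zero => intro parent x hInv _ _ _; exact ⟨rfl, hInv⟩
  | succ f ih =>
    intro parent x hInv hx0 hx hroot
    obtain ⟨hle, hge, hfix⟩ := hInv x.toNat (by omega)
    have hxcast : ((x.toNat : Nat) : Int) = x := by omega
    rw [hxcast] at hle hge hfix
    have hget : PySem.List.pyGetD parent x 0 = parent.getD x.toNat 0 := pvGetD_bridge parent x hx0 hx
    show (pvBCompress root (f+1) parent x).length = parent.length ∧ pvInv (pvBCompress root (f+1) parent x) sol
    rw [show pvBCompress root (f+1) parent x = if PySem.List.pyGetD parent x 0 == root then parent else pvBCompress root f (PySem.List.pySetD parent x root) (PySem.List.pyGetD parent x 0) from rfl]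
    by_cases hpr : parent.getD x.toNat 0 = root
    · rw [hget, if_pos (by simpa using hpr)]
      exact ⟨rfl, hInv⟩
    · rw [hget, if_neg (by simpa using hpr)]
      set p := parent.getD x.toNat 0 with hp
      have hfr0 : 0 ≤ pvFr sol x := pvFr_nonneg sol x
      -- p ≠ x (else fixed point gives pvFr = x = root... then p = root, contra)
      have hpx : p ≠ x := by
        intro hcon
        have := hfix hcon
        rw [this] at hroot
        exact hpr (hroot ▸ hcon)
      have hplt : p < x := by omega
      have hset : PySem.List.pySetD parent x root = parent.set x.toNat root :=
        PySem.List.pySetD_of_nonneg parent root hx0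
      have hlen1 : (parent.set x.toNat root).length = parent.length := by simp
      have hInv1 : pvInv (parent.set x.toNat root) sol := by
        intro y hy
        rw [List.length_set] at hy
        by_cases hyx : y = x.toNat
        · subst hyx
          have hgd : (parent.set x.toNat root).getD x.toNat 0 = root := by
            unfold List.getD
            rw [List.getElem?_set_self (by omega)]
            rfl
          rw [hgd, hxcast]
          refine ⟨le_of_eq hroot, ?_, fun he => hroot.trans he⟩
          rw [← hroot]; exact pvFr_le sol x hx0
        · have hgd : (parent.set x.toNat root).getD y 0 = parent.getD y 0 := by
            unfold List.getD
            rw [List.getElem?_set_ne (by omega)]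
          rw [hgd]
          exact hInv y hy
      have hfrp : pvFr sol p = root := by
        rw [← hroot]
        exact pvFr_between sol x p hle (by omega)
      obtain ⟨hl2, hi2⟩ := ih (parent.set x.toNat root) p (by rw [← hset]; exact hset ▸ hInv1) (by omega) (by rw [hlen1]; omega) hfrp
      rw [hset]
      exact ⟨by rw [hl2, hlen1], hi2⟩

lemma pvBFind_spec (parent sol : List Int) (x : Int) (hInv : pvInv parent sol)
    (hx0 : 0 ≤ x) (hx : x < (parent.length : Int)) :
    ∃ parent', pvBFind parent x = (pvFr sol x, parent') ∧
      parent'.length = parent.length ∧ pvInv parent' sol := by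
  have hroot : pvBRoot parent (x + 1).toNat x = pvFr sol x :=
    pvBRoot_eq parent sol hInv _ x hx0 hx (by omega)
  obtain ⟨hl, hi⟩ := pvBCompress_inv sol (pvFr sol x) (x + 1).toNat parent x hInv hx0 hx rfl
  exact ⟨_, by rw [pvBFind, hroot], hl, hi⟩

lemma pvAInner_eq (sol : List Int) (best : Int) :
    ∀ (i : Int), i < (sol.length : Int) →
      pvAInner sol best i =
        if pvFr sol (i + 1) = 0 then (sol, false)
        else (PySem.List.pySetD sol (pvFr sol (i + 1) - 1) best, true) := by
  intro i
  induction hn : (i + 1).toNat generalizing i with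
  | zero =>
    intro hlen
    rw [pvAInner, dif_neg (by omega), if_pos (by rw [pvFr_zero sol _ (by omega)])]
  | succ f ih =>
    intro hlen
    have hi0 : 0 ≤ i := by omega
    rw [pvAInner, dif_pos hi0]
    rw [pvGetD_bridge sol i hi0 hlen]
    by_cases hfree : sol.getD i.toNat 0 = -1
    · rw [if_pos (by simpa using hfree)]
      have hfr : pvFr sol (i + 1) = i + 1 :=
        pvFr_pos_free sol (i + 1) (by omega) (by simpa using hfree)
      rw [if_neg (by omega), hfr]
      simp
    · rw [if_neg (by simpa using hfree)]
      have hfr : pvFr sol (i + 1) = pvFr sol i :=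
        (pvFr_pos_filled sol (i + 1) (by omega) (by simpa using hfree)).trans (by norm_num)
      rw [ih (i - 1) (by omega) (by omega), hfr]
      norm_num

lemma pvBLoop_all_filled (deadline : List Int) (m : Int) :
    ∀ (cands sol parent : List Int),
      (∀ j ∈ cands, 0 ≤ j ∧ PySem.List.pyGetD deadline j 0 ≤ m) →
      parent.length = (m + 2).toNat →
      pvInv parent sol →
      (∀ i : Nat, sol.getD i 0 ≠ -1) →
      pvBLoop deadline cands sol parent = sol := by
  intro cands
  induction cands with
  | nil => intro sol parent _ _ _ _; rfl
  | cons job rest ih =>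
    intro sol parent hc hlen hInv hfill
    obtain ⟨hj0, hjm⟩ := hc job (List.mem_cons_self)
    rw [pvBLoop]
    set d := PySem.List.pyGetD deadline job 0 with hd
    by_cases hd0 : 0 ≤ d
    · have hdlt : d + 1 < (parent.length : Int) := by omega
      obtain ⟨parent', hfind, hlen', hInv'⟩ := pvBFind_spec parent sol (d + 1) hInv (by omega) hdlt
      rw [if_pos hd0, hfind, pvFr_all_filled sol hfill]
      rw [if_neg (by omega)]
      exact ih sol parent' (fun j hj => hc j (List.mem_cons_of_mem _ hj)) (hlen'.trans hlen) hInv' hfill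
    · rw [if_neg hd0]
      rw [if_neg (by omega)]
      exact ih sol parent (fun j hj => hc j (List.mem_cons_of_mem _ hj)) hlen hInv hfill

lemma pvMain (deadline : List Int) (m : Int) :
    ∀ (cands sol parent : List Int) (filled : Int),
      (∀ j ∈ cands, 0 ≤ j ∧ PySem.List.pyGetD deadline j 0 ≤ m) →
      sol.length = (m + 1).toNat →
      parent.length = (m + 2).toNat →
      pvInv parent sol →
      filled = (sol.length : Int) - sol.count (-1) →
      pvALoop deadline m cands sol filled = pvBLoop deadline cands sol parent := by
  intro cands
  induction cands with
  | nil => intro sol parent filled _ _ _ _ _; rfl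
  | cons best rest ih =>
    intro sol parent filled hc hslen hplen hInv hfil
    obtain ⟨hj0, hjm⟩ := hc best (List.mem_cons_self)
    have hrest : ∀ j ∈ rest, 0 ≤ j ∧ PySem.List.pyGetD deadline j 0 ≤ m :=
      fun j hj => hc j (List.mem_cons_of_mem _ hj)
    rw [pvALoop, pvBLoop]
    set d := PySem.List.pyGetD deadline best 0 with hd
    have hdlen : d < (sol.length : Int) := by omega
    have hcount_le : sol.count (-1) ≤ sol.length := List.count_le_length
    by_cases hdone : filled = m + 1
    · -- all slots filled: A breaks, B's remaining steps are no-ops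
      rw [if_pos (by simpa using hdone)]
      have hcnt0 : sol.count (-1) = 0 := by omega
      have hfill : ∀ i : Nat, sol.getD i 0 ≠ -1 := by
        intro i hcon
        by_cases hilen : i < sol.length
        · have : sol.getD i 0 ∈ sol := by
            rw [List.getD_eq_getElem _ _ hilen]; exact List.getElem_mem _
          rw [hcon] at this
          have := List.count_pos_iff.mpr this
          omega
        · rw [List.getD_eq_default _ _ (by omega)] at hcon
          norm_num at hcon
      exact (pvBLoop_all_filled deadline m (best :: rest) sol parent hc hplen hInv hfill).symm
    · rw [if_neg (by simpa using hdone)]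
      rw [pvAInner_eq sol best d hdlen]
      set r := pvFr sol (d + 1) with hr
      have hr0 : 0 ≤ r := pvFr_nonneg sol (d + 1)
      by_cases hd0 : 0 ≤ d
      · have hdplt : d + 1 < (parent.length : Int) := by omega
        obtain ⟨parent1, hfind, hlen1, hInv1⟩ := pvBFind_spec parent sol (d + 1) hInv (by omega) hdplt
        rw [if_pos hd0, hfind]
        by_cases hrz : r = 0
        · rw [if_pos hrz, if_neg (show ¬(0:Int) < r by omega)]
          exact ih sol parent1 filled hrest hslen (hlen1.trans hplen) hInv1 hfil
        · rw [if_neg hrz, if_pos (show (0:Int) < r by omega)]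
          -- the fill step
          have hfree : sol.getD (r - 1).toNat 0 = -1 := pvFr_free sol (d + 1) (by omega)
          have hrlen : r - 1 < (sol.length : Int) := pvFr_lt_len sol (d + 1) (by omega)
          obtain ⟨parent2, hfind2, hlen2, hInv2⟩ :=
            pvBFind_spec parent1 sol (r - 1) hInv1 (by omega) (by rw [hlen1]; omega)
          set r2 := pvFr sol (r - 1) with hr2
          set sol' := PySem.List.pySetD sol (r - 1) best with hsol'
          have hsol'_set : sol' = sol.set (r - 1).toNat best := PySem.List.pySetD_of_nonneg sol best (by omega)
          have hfr' : ∀ y : Int, pvFr sol' y = if pvFr sol y = r then r2 else pvFr sol y := by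
            intro y
            rw [hsol'_set]
            exact pvFr_set sol r best (by omega) hfree (by omega) y
          have hlen' : sol'.length = sol.length := by rw [hsol'_set]; simp
          -- new parent satisfies the invariant w.r.t. sol'
          have hInv' : pvInv (PySem.List.pySetD parent2 r r2) sol' := by
            intro y hy
            rw [PySem.List.length_pySetD, hlen2] at hy
            have hset2 : PySem.List.pySetD parent2 r r2 = parent2.set r.toNat r2 :=
              PySem.List.pySetD_of_nonneg parent2 r2 (by omega)
            by_cases hyr : y = r.toNat
            · subst hyr
              have hgd : (PySem.List.pySetD parent2 r r2).getD r.toNat 0 = r2 := by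
                rw [hset2]
                unfold List.getD
                rw [List.getElem?_set_self (by omega)]
                rfl
              rw [hgd]
              have hfr'r : pvFr sol' r = r2 := by
                rw [hfr' r, if_pos (pvFr_pos_free sol r (by omega) hfree)]
              have hr2le : r2 ≤ r - 1 := by
                have := pvFr_le sol (r - 1) (by omega)
                rw [← hr2] at this; exact this
              constructor
              · rw [show ((r.toNat : Nat) : Int) = r by omega, hfr'r]
              constructor
              · omega
              · intro he
                rw [show ((r.toNat : Nat) : Int) = r by omega] at he ⊢
                omega
            · have hgd : (PySem.List.pySetD parent2 r r2).getD y 0 = parent2.getD y 0 := by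
                rw [hset2]
                unfold List.getD
                rw [List.getElem?_set_ne (by omega)]
              rw [hgd]
              obtain ⟨hle, hge, hfix⟩ := hInv2 y (by omega)
              have hyner : (y : Int) ≠ r := by omega
              rw [hfr' y]
              by_cases hcase : pvFr sol (y : Int) = r
              · rw [if_pos hcase]
                have hr2lt : r2 ≤ r - 1 := by
                  have := pvFr_le sol (r - 1) (by omega)
                  rw [← hr2] at this; exact this
                refine ⟨by omega, hge, fun he => absurd (hfix he) (by omega)⟩
              · rw [if_neg hcase]
                exact ⟨hle, hge, hfix⟩
          -- counts
          have hmem : sol.getD (r - 1).toNat 0 ∈ sol := by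
            rw [List.getD_eq_getElem _ _ (by omega)]
            exact List.getElem_mem _
          have hcpos : 0 < sol.count (-1) :=
            List.count_pos_iff.mpr (by rw [← hfree]; exact hmem)
          have hgetelem : sol[(r - 1).toNat]'(by omega) = -1 := by
            have h2 := hfree
            rwa [List.getD_eq_getElem _ _ (by omega)] at h2
          have hcount' : sol'.count (-1) = sol.count (-1) - 1 := by
            rw [hsol'_set, List.count_set (by omega), hgetelem]
            simp [show ¬(best = -1) by omega]
          show pvALoop deadline m rest sol' (filled + 1) =
            pvBLoop deadline rest sol' (PySem.List.pySetD (pvBFind parent1 (r - 1)).2 r (pvBFind parent1 (r - 1)).1)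
          rw [hfind2]
          refine ih sol' (PySem.List.pySetD parent2 r r2) (filled + 1) hrest
            (by rw [hlen']; exact hslen)
            (by rw [PySem.List.length_pySetD, hlen2, hlen1, hplen])
            hInv' ?_
          rw [hlen']
          omega
      · rw [if_neg hd0]
        have hrz : r = 0 := by rw [hr]; exact pvFr_zero sol (d + 1) (by omega)
        rw [if_pos hrz]
        exact ih sol parent filled hrest hslen hplen hInv hfil

theorem greedy_schedule_spec' (profit deadline : List Int)
    (hne : deadline ≠ []) (hlen : profit.length ≤ deadline.length) :
    greedy_schedule profit deadline = greedy_schedule_alt profit deadline := by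
  obtain ⟨m, hm⟩ : ∃ m, PySem.List.max? deadline (fun x => x) = some m := by
    cases h : PySem.List.max? deadline (fun x => x) with
    | none => exact absurd ((PySem.List.max?_eq_none_iff deadline _).mp h) hne
    | some m => exact ⟨m, rfl⟩
  have hmax : ∀ y ∈ deadline, y ≤ m := PySem.List.max?_isMax hm
  rw [greedy_schedule, greedy_schedule_alt, hm]
  simp only [Option.getD_some]
  rw [PySem.List.pyRepeat_singleton]
  refine congrArg (·, m) ?_
  have hcands : ∀ j ∈ PySem.List.sorted (PySem.List.pyRange 0 (profit.length : Int) 1)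
      (fun i => PySem.List.pyGetD profit i 0) true,
      0 ≤ j ∧ PySem.List.pyGetD deadline j 0 ≤ m := by
    intro j hj
    rw [PySem.List.mem_sorted, PySem.List.mem_pyRange_one] at hj
    refine ⟨hj.1, hmax _ (PySem.List.pyGetD_mem deadline 0 ?_)⟩
    simp [PySem.Raise.InRange]
    omega
  have hplen : (PySem.List.pyRange 0 (m + 2) 1).length = (m + 2).toNat := by
    rw [PySem.List.length_pyRange_one]; norm_num
  have hpget : ∀ x : Nat, x < (m + 2).toNat →
      (PySem.List.pyRange 0 (m + 2) 1).getD x 0 = x := by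
    intro x hx
    rw [PySem.List.pyRange_one, PySem.List.getD_map_range _ _ _ _ (by omega)]
    norm_num
  have hInv0 : pvInv (PySem.List.pyRange 0 (m + 2) 1) (List.replicate (m + 1).toNat (-1)) := by
    intro x hx
    rw [hplen] at hx
    rw [hpget x hx]
    have hfr : pvFr (List.replicate (m + 1).toNat (-1)) x = x :=
      pvFr_replicate (m + 1).toNat x (by omega) (by omega)
    exact ⟨le_of_eq hfr, le_refl _, fun _ => hfr⟩
  have := pvMain deadline m
    (PySem.List.sorted (PySem.List.pyRange 0 (profit.length : Int) 1)
      (fun i => PySem.List.pyGetD profit i 0) true)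
    (List.replicate (m + 1).toNat (-1)) (PySem.List.pyRange 0 (m + 2) 1) 0
    hcands (by simp) hplen hInv0
    (by rw [List.count_replicate_self]; simp)
  exact this

-- ===== VERDICT (by name: the statement is the Claim_ definition above) =====
theorem greedy_schedule_spec : Claim_equal_greedy_schedule := by
  intro profit deadline _hdom hpre
  exact greedy_schedule_spec' profit deadline hpre.1 hpre.2
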